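-- pv_equiv track=rewrite | github.com/ChoudharyNabin/python_assignments | ps12.py | are_all_digits_even
-- ===== SOURCE A (Python) =====
-- def are_all_digits_even(number):
--     is_even = True
--     while number != 0:
--         digit = number % 10
--         if digit % 2 != 0:
--             is_even = False
--             break
--         number = number // 10
--     return is_even
-- ===== SOURCE B (Python) =====
-- def are_all_digits_even(number):
--     return all(c in '02468' for c in str(number))
-- ===== Notes on version B (the rewrite author's own statement) =====
-- stated objective: idiomatic
-- what changed: B tests that every character of the decimal string representation is an even digit instead of peeling digits arithmetically with %/// in a while loop.
import Mathlib
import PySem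

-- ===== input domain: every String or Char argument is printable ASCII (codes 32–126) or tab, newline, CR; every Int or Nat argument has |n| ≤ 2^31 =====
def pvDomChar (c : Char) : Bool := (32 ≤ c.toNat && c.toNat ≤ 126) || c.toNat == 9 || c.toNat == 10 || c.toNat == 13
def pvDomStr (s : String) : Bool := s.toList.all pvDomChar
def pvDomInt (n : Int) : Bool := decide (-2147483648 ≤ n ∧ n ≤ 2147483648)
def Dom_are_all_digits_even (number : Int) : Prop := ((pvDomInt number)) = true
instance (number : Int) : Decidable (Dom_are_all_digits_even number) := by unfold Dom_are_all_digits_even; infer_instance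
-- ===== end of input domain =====

-- B tests every character of the decimal string representation for being an even digit,
-- instead of A's arithmetic digit-peeling while-loop; same cost, more idiomatic.


-- ===== PORT A =====
-- termination measure for A's while loop: |number| strictly drops when the loop continues
theorem pvA_dec (n : Int) (h0 : ¬ n = 0)
    (he : ¬ PySem.Int.mod (PySem.Int.mod n 10) 2 ≠ 0) :
    (PySem.Int.floordiv n 10).natAbs < n.natAbs := by
  have h1 := PySem.Int.floordiv_mul_add_mod n 10
  have h2 := PySem.Int.mod_nonneg n (b := 10) (by norm_num)
  have h3 := PySem.Int.mod_lt n (b := 10) (by norm_num)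
  rw [PySem.Int.mod_eq_emod_of_pos (by norm_num : (0:Int) < 2)] at he
  omega

-- the while loop of A, with its flag/break structure folded into the return values
def pvLoopA (number : Int) : Bool :=
  if number = 0 then true
  else
    let digit := PySem.Int.mod number 10
    if PySem.Int.mod digit 2 ≠ 0 then false
    else pvLoopA (PySem.Int.floordiv number 10)
termination_by number.natAbs
decreasing_by exact pvA_dec number (by assumption) (by assumption)

def are_all_digits_even (number : Int) : Bool := pvLoopA number

-- ===== PORT B =====
def are_all_digits_even_alt (number : Int) : Bool :=
  (PySem.Int.toStr number).toList.all (fun c => ("02468".toList).contains c)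

-- ===== PRECONDITION & SPEC =====
def Spec_are_all_digits_even (number : Int) (out : Bool) : Prop := out = are_all_digits_even_alt number
instance (number : Int) (out : Bool) : Decidable (Spec_are_all_digits_even number out) := by unfold Spec_are_all_digits_even; infer_instance

-- ===== CLAIM (what is proved, stated in full; the proofs are below) =====
def Claim_equal_are_all_digits_even : Prop := ∀ (number : Int), Dom_are_all_digits_even number → Spec_are_all_digits_even number (are_all_digits_even number)

-- ===== LEMMAS AND PROOFS =====

-- reference predicate: all decimal digits of a natural number are even
def pvEvenDigits (n : Nat) : Bool :=
  if n = 0 then true else (n % 10 % 2 == 0) && pvEvenDigits (n / 10)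
termination_by n
decreasing_by exact Nat.div_lt_self (by omega) (by norm_num)

theorem pv_digitChar_even (m : Nat) (h : m < 10) :
    ("02468".toList).contains (Nat.digitChar m) = (m % 2 == 0) := by
  interval_cases m <;> decide

theorem pv_core_all (f : Nat) : ∀ (n : Nat) (ds : List Char), n < 10 ^ f →
    (Nat.toDigitsCore 10 f n ds).all (fun c => ("02468".toList).contains c)
      = (pvEvenDigits n && ds.all (fun c => ("02468".toList).contains c)) := by
  induction f with
  | zero =>
    intro n ds h
    have hn : n = 0 := by omega
    simp [Nat.toDigitsCore, hn, pvEvenDigits]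
  | succ f ih =>
    intro n ds h
    rw [Nat.toDigitsCore]
    by_cases hdiv : n / 10 = 0
    · have hn10 : n < 10 := by omega
      have hmod : n % 10 = n := Nat.mod_eq_of_lt hn10
      simp only [hdiv, if_true, List.all_cons, pv_digitChar_even (n % 10) (Nat.mod_lt _ (by norm_num))]
      rw [pvEvenDigits]
      by_cases hn : n = 0
      · simp [hn]
      · rw [if_neg hn, hdiv, pvEvenDigits]
        simp
    · have hlt : n / 10 < 10 ^ f := by
        have : 10 ^ (f + 1) = 10 ^ f * 10 := by ring
        omega
      rw [if_neg hdiv, ih (n / 10) _ hlt]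
      have hn : n ≠ 0 := by omega
      conv_rhs => rw [pvEvenDigits, if_neg hn]
      simp only [List.all_cons, pv_digitChar_even (n % 10) (Nat.mod_lt _ (by norm_num))]
      cases pvEvenDigits (n / 10) <;> cases (n % 10 % 2 == 0) <;> simp

theorem pvLoopA_nonneg (n : Nat) : pvLoopA (↑n) = pvEvenDigits n := by
  induction n using Nat.strong_induction_on with
  | _ n ih =>
    rw [pvLoopA, pvEvenDigits]
    by_cases hn : n = 0
    · simp [hn]
    · have hcast : (↑n : Int) ≠ 0 := by exact_mod_cast hn
      rw [if_neg hcast, if_neg hn]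
      have hm : PySem.Int.mod (↑n) 10 = ((n % 10 : Nat) : Int) := by
        rw [PySem.Int.mod_eq_emod_of_pos (by norm_num)]; push_cast; ring
      have hm2 : PySem.Int.mod ((n % 10 : Nat) : Int) 2 = ((n % 10 % 2 : Nat) : Int) := by
        rw [PySem.Int.mod_eq_emod_of_pos (by norm_num)]; push_cast; ring
      have hd : PySem.Int.floordiv (↑n) 10 = ((n / 10 : Nat) : Int) := by
        rw [PySem.Int.floordiv_eq_ediv_of_pos (by norm_num)]; push_cast; ring
      simp only [hm, hm2, hd, ih (n / 10) (Nat.div_lt_self (by omega) (by norm_num))]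
      by_cases he : n % 10 % 2 = 0
      · have h0 : ((n % 10 % 2 : Nat) : Int) = 0 := by exact_mod_cast he
        simp [h0, he]
      · have h0 : ((n % 10 % 2 : Nat) : Int) ≠ 0 := by exact_mod_cast he
        have h1 : ((n : Int)) % 2 = 1 := by omega
        have h2 : n % 2 = 1 := by omega
        simp [h0, h1, h2]

theorem pvLoopA_neg : ∀ (k : Nat) (n : Int), n.natAbs ≤ k → n < 0 → pvLoopA n = false := by
  intro k
  induction k with
  | zero => intro n h hneg; omega
  | succ k ih =>
    intro n h hneg
    rw [pvLoopA]
    have hn : ¬ n = 0 := by omega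
    rw [if_neg hn]
    by_cases he : PySem.Int.mod (PySem.Int.mod n 10) 2 ≠ 0
    · rw [if_pos he]
    · rw [if_neg (by simpa using he)]
      have hdec := pvA_dec n hn he
      have h1 := PySem.Int.floordiv_mul_add_mod n 10
      have h2 := PySem.Int.mod_nonneg n (b := 10) (by norm_num)
      exact ih _ (by omega) (by omega)

theorem pv_lt_pow (n : Nat) : n < 10 ^ (n + 1) := by
  calc n < 2 ^ n := Nat.lt_two_pow_self
    _ ≤ 10 ^ n := Nat.pow_le_pow_left (by norm_num) n
    _ ≤ 10 ^ (n + 1) := Nat.pow_le_pow_right (by norm_num) (by omega)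

theorem pvAlt_nonneg (n : Nat) : are_all_digits_even_alt (↑n) = pvEvenDigits n := by
  unfold are_all_digits_even_alt
  rw [show (PySem.Int.toStr (↑n)).toList = PySem.Int.toChars (↑n) from PySem.Int.toList_toStr _]
  unfold PySem.Int.toChars
  rw [if_neg (by omega : ¬ ((n : Int) < 0))]
  have : ((n : Int)).toNat = n := Int.toNat_natCast n
  rw [this]
  unfold Nat.toDigits
  rw [pv_core_all (n + 1) n [] (pv_lt_pow n)]
  simp

-- ===== VERDICT (by name: the statement is the Claim_ definition above) =====
theorem are_all_digits_even_spec : Claim_equal_are_all_digits_even := by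
  intro number _
  unfold Spec_are_all_digits_even are_all_digits_even
  cases number with
  | ofNat m => exact (pvLoopA_nonneg m).trans (pvAlt_nonneg m).symm
  | negSucc m =>
    rw [pvLoopA_neg (Int.negSucc m).natAbs _ le_rfl (Int.negSucc_lt_zero m)]
    unfold are_all_digits_even_alt
    rw [show (PySem.Int.toStr _).toList = PySem.Int.toChars _ from PySem.Int.toList_toStr _]
    unfold PySem.Int.toChars
    rw [if_pos (Int.negSucc_lt_zero m)]
    simp
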